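-- pv_equiv track=rewrite | github.com/joel35/challenges | 29/wrong_char.py | get_index_different_char
-- ===== SOURCE A (Python) =====
-- def get_index_different_char(chars):
--     alphanumeric = 'abcdefghijklmnopqrstuvwxyzABCDEFGHIJKLMNOPQRSTUVWXYZ0123456789'
--
--     alpha = [char for char in chars if str(char) in alphanumeric]
--     not_alpha = [char for char in chars if str(char) not in alphanumeric]
--     diff_item = not_alpha if len(alpha) > len(not_alpha) else alpha
--     diff_index = -1
--
--     for index, item in enumerate(chars):
--         if item in diff_item:
--             diff_index = index
--     return diff_index
-- ===== SOURCE B (Python) =====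
-- def get_index_different_char(chars):
--     alphanumeric = 'abcdefghijklmnopqrstuvwxyzABCDEFGHIJKLMNOPQRSTUVWXYZ0123456789'
--     alpha_count = nonalpha_count = 0
--     last_alpha = last_nonalpha = -1
--     for index, char in enumerate(chars):
--         if str(char) in alphanumeric:
--             alpha_count += 1
--             last_alpha = index
--         else:
--             nonalpha_count += 1
--             last_nonalpha = index
--     return last_nonalpha if alpha_count > nonalpha_count else last_alpha
-- ===== Notes on version B (the rewrite author's own statement) =====
-- stated objective: faster
-- what changed: Replaces A's two filter comprehensions plus a final membership rescan of a list with a single pass over enumerate(chars) maintaining class counts and last-seen indices.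
import Mathlib
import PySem

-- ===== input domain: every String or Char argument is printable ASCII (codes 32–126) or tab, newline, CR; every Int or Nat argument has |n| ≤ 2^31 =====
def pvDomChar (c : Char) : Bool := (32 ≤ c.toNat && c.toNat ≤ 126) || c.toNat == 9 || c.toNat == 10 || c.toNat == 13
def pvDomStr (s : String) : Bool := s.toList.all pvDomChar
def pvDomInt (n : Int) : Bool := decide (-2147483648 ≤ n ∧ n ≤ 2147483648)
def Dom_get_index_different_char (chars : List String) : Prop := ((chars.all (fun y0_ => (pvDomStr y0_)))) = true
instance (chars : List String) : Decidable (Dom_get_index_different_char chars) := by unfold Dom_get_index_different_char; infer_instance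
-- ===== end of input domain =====

-- B replaces A's two filter comprehensions plus a membership rescan with one pass keeping counts and last-indices (objective: faster, constant-factor).

-- ===== PORT A =====
def pvAlnum : String := "abcdefghijklmnopqrstuvwxyzABCDEFGHIJKLMNOPQRSTUVWXYZ0123456789"

def get_index_different_char (chars : List String) : Int :=
  let alpha := chars.filter (fun c => PySem.Str.isIn c pvAlnum)
  let not_alpha := chars.filter (fun c => !(PySem.Str.isIn c pvAlnum))
  let diff_item := if alpha.length > not_alpha.length then not_alpha else alpha
  (PySem.List.enumerate chars 0).foldl
    (fun diff_index p => if diff_item.contains p.2 then p.1 else diff_index) (-1)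

-- ===== PORT B =====
def get_index_different_char_alt (chars : List String) : Int :=
  let st := (PySem.List.enumerate chars 0).foldl
    (fun (s : Int × Int × Int × Int) p =>
      if PySem.Str.isIn p.2 pvAlnum then (s.1 + 1, s.2.1, p.1, s.2.2.2)
      else (s.1, s.2.1 + 1, s.2.2.1, p.1))
    (0, 0, -1, -1)
  if st.1 > st.2.1 then st.2.2.2 else st.2.2.1

-- ===== PRECONDITION & SPEC =====
def Spec_get_index_different_char (chars : List String) (out : Int) : Prop := out = get_index_different_char_alt chars
instance (chars : List String) (out : Int) : Decidable (Spec_get_index_different_char chars out) := by unfold Spec_get_index_different_char; infer_instance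

-- ===== CLAIM (what is proved, stated in full; the proofs are below) =====
def Claim_equal_get_index_different_char : Prop := ∀ (chars : List String), Dom_get_index_different_char chars → Spec_get_index_different_char chars (get_index_different_char chars)

-- ===== LEMMAS AND PROOFS =====

-- last index (as set by A's final loop) of an element satisfying q, starting the enumeration at s
def pvLastIdx (q : String → Bool) (chars : List String) (s : Int) (acc : Int) : Int :=
  (PySem.List.enumerate chars s).foldl (fun d p => if q p.2 then p.1 else d) acc

-- A's final loop, with membership in a fixed list L, equals pvLastIdx q whenever L.contains agrees with q on chars
theorem pvFoldA_eq (q : String → Bool) (L : List String) (chars : List String)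
    (h : ∀ x ∈ chars, L.contains x = q x) (s acc : Int) :
    (PySem.List.enumerate chars s).foldl (fun d p => if L.contains p.2 then p.1 else d) acc
      = pvLastIdx q chars s acc := by
  induction chars generalizing s acc with
  | nil => rfl
  | cons x xs ih =>
    simp only [pvLastIdx, PySem.List.enumerate_cons, List.foldl_cons,
      h x (List.mem_cons_self ..)]
    exact ih (fun y hy => h y (List.mem_cons_of_mem _ hy)) (s + 1) _

-- B's fold computes the two counts and the two last-indices
theorem pvB_fold (chars : List String) (s ca cn la ln : Int) :
    (PySem.List.enumerate chars s).foldl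
      (fun (st : Int × Int × Int × Int) p =>
        if PySem.Str.isIn p.2 pvAlnum then (st.1 + 1, st.2.1, p.1, st.2.2.2)
        else (st.1, st.2.1 + 1, st.2.2.1, p.1))
      (ca, cn, la, ln)
      = (ca + (chars.countP (fun c => PySem.Str.isIn c pvAlnum) : Int),
         cn + (chars.countP (fun c => !(PySem.Str.isIn c pvAlnum)) : Int),
         pvLastIdx (fun c => PySem.Str.isIn c pvAlnum) chars s la,
         pvLastIdx (fun c => !(PySem.Str.isIn c pvAlnum)) chars s ln) := by
  induction chars generalizing s ca cn la ln with
  | nil => simp [pvLastIdx, PySem.List.enumerate_nil]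
  | cons x xs ih =>
    simp only [pvLastIdx, PySem.List.enumerate_cons, List.foldl_cons, List.countP_cons]
    by_cases hx : PySem.Str.isIn x pvAlnum
    · simp only [hx, if_pos, Bool.not_true]
      rw [ih]
      simp [pvLastIdx]
      ring_nf
    · simp only [hx, Bool.not_false, ite_true]
      rw [ih]
      simp [pvLastIdx]
      ring_nf

-- ===== VERDICT (by name: the statement is the Claim_ definition above) =====
theorem get_index_different_char_spec : Claim_equal_get_index_different_char := by
  intro chars _
  show _ = _
  unfold get_index_different_char get_index_different_char_alt
  rw [pvB_fold]
  have hmem : ∀ (q : String → Bool), ∀ x ∈ chars, (chars.filter q).contains x = q x := by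
    intro q x hx
    by_cases h : q x
    · simp [List.contains_eq_mem, List.mem_filter, hx, h]
    · simp [List.contains_eq_mem, List.mem_filter, h]
  have hcnt : ∀ (q : String → Bool), chars.countP q = (chars.filter q).length := by
    intro q; exact (List.countP_eq_length_filter ..)
  dsimp only
  by_cases hgt : (chars.filter (fun c => PySem.Str.isIn c pvAlnum)).length >
      (chars.filter (fun c => !(PySem.Str.isIn c pvAlnum))).length
  · rw [if_pos hgt, if_pos (by rw [hcnt, hcnt]; omega)]
    exact pvFoldA_eq _ _ chars (hmem _) 0 (-1)
  · rw [if_neg hgt, if_neg (by rw [hcnt, hcnt]; omega)]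
    exact pvFoldA_eq _ _ chars (hmem _) 0 (-1)
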